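-- pv_equiv track=rewrite | github.com/RegNLP/MultiPassage-RegIR | src/ltr/step4b_train_ltr.py | check_contiguous_groups
-- ===== SOURCE A (Python) =====
-- from typing import Dict, List, Tuple
--
-- def check_contiguous_groups(qids: List[str]) -> bool:
--     """Return True iff each qid appears in a single contiguous block."""
--     first_seen: Dict[str, int] = {}
--     last_seen: Dict[str, int] = {}
--     for i, q in enumerate(qids):
--         if q not in first_seen:
--             first_seen[q] = i
--         last_seen[q] = i
--     # If any qid appears, its indices must form a single block
--     for q in first_seen:
--         start, end = first_seen[q], last_seen[q]
--         # Check no other qid interleaves within [start, end]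
--         if any(qids[i] != q for i in range(start, end + 1)):
--             return False
--     return True
-- ===== SOURCE B (Python) =====
-- from typing import Dict, List, Tuple
--
-- def check_contiguous_groups(qids):
--     """Return True iff each qid appears in a single contiguous block."""
--     keys = []
--     for q in qids:
--         if not keys or keys[-1] != q:
--             keys.append(q)
--     return len(keys) == len(set(keys))
-- ===== Notes on version B (the rewrite author's own statement) =====
-- stated objective: simpler
-- what changed: Replaces the two dicts of first/last indices plus a per-key rescan of the index interval by a single run-compression pass (collapse consecutive equal qids into run keys) followed by a duplicate test on the run keys.
import Mathlib
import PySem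

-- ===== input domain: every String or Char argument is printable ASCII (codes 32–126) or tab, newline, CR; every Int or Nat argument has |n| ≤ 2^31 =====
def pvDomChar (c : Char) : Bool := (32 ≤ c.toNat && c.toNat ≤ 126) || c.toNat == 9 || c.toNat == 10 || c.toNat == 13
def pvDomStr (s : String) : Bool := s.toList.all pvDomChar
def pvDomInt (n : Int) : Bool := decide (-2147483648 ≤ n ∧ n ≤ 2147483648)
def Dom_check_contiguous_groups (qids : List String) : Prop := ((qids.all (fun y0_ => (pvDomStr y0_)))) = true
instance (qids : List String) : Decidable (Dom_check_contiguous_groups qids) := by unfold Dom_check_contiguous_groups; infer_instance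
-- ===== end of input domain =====

-- B replaces A's first/last-index dicts and per-key interval rescans by one run-compression
-- pass followed by a duplicate test on the run keys (objective: simpler).

-- ===== PORT A =====
-- Helper: the loop body of A's first pass (the first_seen / last_seen updates).
def aStep (st : PySem.Dict String Int × PySem.Dict String Int) (iq : Int × String) :
    PySem.Dict String Int × PySem.Dict String Int :=
  (if st.1.contains iq.2 then st.1 else st.1.insert iq.2 iq.1, st.2.insert iq.2 iq.1)

def check_contiguous_groups (qids : List String) : Bool :=
  let st := (PySem.List.enumerate qids 0).foldl aStep (PySem.Dict.empty, PySem.Dict.empty)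
  -- q ranges over the dict's own keys, so both get? below are always `some`;
  -- `.getD 0` (Python's first_seen[q]) never takes its default
  st.1.keys.all fun q =>
    let start := (st.1.get? q).getD 0
    let stop := (st.2.get? q).getD 0
    !((PySem.List.pyRange start (stop + 1) 1).any fun i =>
        decide (PySem.List.pyGet? qids i ≠ some q))

-- ===== PORT B =====
-- Helper: the loop body of B ('if not keys or keys[-1] != q: keys.append(q)').
def bStep (keys : List String) (q : String) : List String :=
  if keys = [] ∨ PySem.List.pyGet? keys (-1) ≠ some q then keys ++ [q] else keys

def check_contiguous_groups_alt (qids : List String) : Bool :=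
  let keys := qids.foldl bStep []
  keys.length == (PySem.Set.ofList keys).length

-- ===== PRECONDITION & SPEC =====
def Spec_check_contiguous_groups (qids : List String) (out : Bool) : Prop := out = check_contiguous_groups_alt qids
instance (qids : List String) (out : Bool) : Decidable (Spec_check_contiguous_groups qids out) := by unfold Spec_check_contiguous_groups; infer_instance

-- ===== CLAIM (what is proved, stated in full; the proofs are below) =====
def Claim_equal_check_contiguous_groups : Prop := ∀ (qids : List String), Dom_check_contiguous_groups qids → Spec_check_contiguous_groups qids (check_contiguous_groups qids)

-- ===== LEMMAS AND PROOFS =====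

-- index of the first occurrence of q
def fIdx (q : String) : List String → Option Nat
  | [] => none
  | x :: xs => if x = q then some 0 else (fIdx q xs).map (· + 1)

-- index of the last occurrence of q
def lIdx (q : String) : List String → Option Nat
  | [] => none
  | x :: xs =>
    match lIdx q xs with
    | some j => some (j + 1)
    | none => if x = q then some 0 else none

-- run keys: collapse consecutive equal elements
def rk : List String → List String
  | [] => []
  | x :: xs => x :: rk (xs.dropWhile (fun y => y == x))
termination_by l => l.length
decreasing_by
  simp only [List.length_cons]
  exact Nat.lt_succ_of_le (List.length_dropWhile_le _ _)

-- "the occurrences of q in l fill the whole interval [first, last]"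
def C (l : List String) (q : String) : Prop :=
  ∀ a c k, fIdx q l = some a → lIdx q l = some c → a ≤ k → k ≤ c → l[k]? = some q

def AS (l : List String) : Prop := ∀ q, C l q

lemma lIdx_cons (q x : String) (xs : List String) :
    lIdx q (x :: xs) = (match lIdx q xs with
      | some j => some (j + 1)
      | none => if x = q then some 0 else none) := rfl

lemma mem_fIdx (q : String) (l : List String) : q ∈ l ↔ (fIdx q l).isSome := by
  induction l with
  | nil => simp [fIdx]
  | cons x xs ih =>
    by_cases h : x = q
    · subst h
      simp [fIdx]
    · have hne : ¬ q = x := fun hh => h hh.symm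
      simp only [fIdx, if_neg h, List.mem_cons, hne, false_or]
      rw [ih]
      cases fIdx q xs <;> simp

lemma mem_lIdx (q : String) (l : List String) : q ∈ l ↔ (lIdx q l).isSome := by
  induction l with
  | nil => simp [lIdx]
  | cons x xs ih =>
    cases hL : lIdx q xs with
    | some j =>
      have hm : q ∈ xs := by rw [ih, hL]; simp
      simp [lIdx, hL, hm]
    | none =>
      have hm : q ∉ xs := by rw [ih, hL]; simp
      by_cases h : x = q
      · subst h
        simp [lIdx, hL]
      · have hne : ¬ q = x := fun hh => h hh.symm
        simp [lIdx, hL, h, hne, hm]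

lemma shiftC (q y : String) (ys : List String) (hq : q ≠ y) : C (y :: ys) q ↔ C ys q := by
  have hyq : ¬ y = q := fun hh => hq hh.symm
  have hf : fIdx q (y :: ys) = (fIdx q ys).map (· + 1) := by
    simp [fIdx, hyq]
  constructor
  · intro h a c k ha hc hak hkc
    have h1 : fIdx q (y :: ys) = some (a + 1) := by rw [hf, ha]; rfl
    have h2 : lIdx q (y :: ys) = some (c + 1) := by simp [lIdx, hc]
    have := h (a + 1) (c + 1) (k + 1) h1 h2 (by omega) (by omega)
    simpa using this
  · intro h a' c' k ha' hc' h1 h2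
    rw [hf] at ha'
    cases hfa : fIdx q ys with
    | none => rw [hfa] at ha'; simp at ha'
    | some a =>
      rw [hfa] at ha'; simp at ha'
      cases hlc : lIdx q ys with
      | none => simp [lIdx, hlc, hyq] at hc'
      | some c =>
        simp [lIdx, hlc] at hc'
        obtain ⟨k', rfl⟩ : ∃ k', k = k' + 1 := ⟨k - 1, by omega⟩
        simpa using h a c k' hfa hlc (by omega) (by omega)

lemma AS_nil : AS [] := by
  intro q a c k ha
  simp [fIdx] at ha

-- new distinct head: AS (x :: xs) ↔ x ∉ xs ∧ AS xs
lemma AS_step2 (x : String) (xs : List String) (hx : xs.head? ≠ some x) :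
    AS (x :: xs) ↔ x ∉ xs ∧ AS xs := by
  constructor
  · intro h
    have hnot : x ∉ xs := by
      intro hmem
      have hS := (mem_lIdx x xs).mp hmem
      cases hL : lIdx x xs with
      | none => rw [hL] at hS; simp at hS
      | some j =>
        have h1 : fIdx x (x :: xs) = some 0 := by simp [fIdx]
        have h2 : lIdx x (x :: xs) = some (j + 1) := by simp [lIdx, hL]
        have := h x 0 (j + 1) 1 h1 h2 (by omega) (by omega)
        cases xs with
        | nil => simp at hmem
        | cons z t =>
          simp at this
          simp at hx
          exact hx this
    refine ⟨hnot, fun q => ?_⟩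
    by_cases hq : q = x
    · subst hq
      intro a c k ha _ _ _
      exact absurd ((mem_fIdx q xs).mpr (by rw [ha]; simp)) hnot
    · exact (shiftC q x xs hq).mp (h q)
  · rintro ⟨hnot, h⟩ q
    by_cases hq : q = x
    · subst hq
      intro a c k ha hc hak hkc
      have hfn : fIdx q xs = none := by
        cases hF : fIdx q xs with
        | none => rfl
        | some j => exact absurd ((mem_fIdx _ _).mpr (by rw [hF]; simp)) hnot
      have hln : lIdx q xs = none := by
        cases hF : lIdx q xs with
        | none => rfl
        | some j => exact absurd ((mem_lIdx _ _).mpr (by rw [hF]; simp)) hnot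
      have ha0 : a = 0 := by simp [fIdx] at ha; omega
      have hc0 : c = 0 := by simp [lIdx, hln] at hc; omega
      have : k = 0 := by omega
      subst this; simp
    · exact (shiftC q x xs hq).mpr (h q)

-- repeated head: AS (x :: x :: t) ↔ AS (x :: t)
lemma AS_step1 (x : String) (t : List String) : AS (x :: x :: t) ↔ AS (x :: t) := by
  have hS : (lIdx x (x :: t)).isSome := (mem_lIdx x (x :: t)).mp (by simp)
  cases hL : lIdx x (x :: t) with
  | none => rw [hL] at hS; simp at hS
  | some c =>
    constructor
    · intro h q
      by_cases hq : q = x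
      · subst hq
        intro a c' k ha hc' hak hkc
        have h1 : fIdx q (q :: q :: t) = some 0 := by simp [fIdx]
        have h2 : lIdx q (q :: q :: t) = some (c + 1) := by rw [lIdx_cons, hL]
        have ha0 : a = 0 := by simp [fIdx] at ha; omega
        have hcc : c' = c := by rw [hL] at hc'; simp at hc'; omega
        have := h q 0 (c + 1) (k + 1) h1 h2 (by omega) (by omega)
        simpa using this
      · exact (shiftC q x (x :: t) hq).mp (h q)
    · intro h q
      by_cases hq : q = x
      · subst hq
        intro a c' k ha hc' hak hkc
        have ha0 : a = 0 := by simp [fIdx] at ha; omega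
        have hcc : c' = c + 1 := by rw [lIdx_cons, hL] at hc'; simp at hc'; omega
        subst ha0 hcc
        cases k with
        | zero => simp
        | succ k' =>
          have h1 : fIdx q (q :: t) = some 0 := by simp [fIdx]
          have := h q 0 c k' h1 hL (by omega) (by omega)
          simpa using this
      · exact (shiftC q x (x :: t) hq).mpr (h q)

lemma mem_dropWhile_eq (q x : String) (xs : List String) (hq : q ≠ x) :
    q ∈ xs.dropWhile (fun y => y == x) ↔ q ∈ xs := by
  induction xs with
  | nil => simp
  | cons z t ih =>
    by_cases hz : z = x
    · subst hz
      simp only [List.dropWhile_cons, beq_self_eq_true, if_true]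
      rw [ih]
      simp [hq]
    · simp [hz]

lemma mem_rk (q : String) (l : List String) : q ∈ rk l ↔ q ∈ l := by
  induction l using rk.induct with
  | case1 => simp [rk]
  | case2 x xs ih =>
    rw [rk]
    by_cases hq : q = x
    · subst hq; simp
    · simp only [List.mem_cons, ih, mem_dropWhile_eq q x xs hq]

lemma AS_iff_nodup_rk : ∀ (N : Nat) (l : List String), l.length ≤ N → (AS l ↔ (rk l).Nodup) := by
  intro N
  induction N with
  | zero =>
    intro l hl
    have : l = [] := by cases l <;> simp_all
    subst this
    simp [rk, AS_nil]
  | succ N ih =>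
    intro l hl
    cases l with
    | nil => simp [rk, AS_nil]
    | cons x xs =>
      by_cases h : xs.head? = some x
      · obtain ⟨t, rfl⟩ : ∃ t, xs = x :: t := by
          cases xs with
          | nil => simp at h
          | cons z t => simp at h; subst h; exact ⟨t, rfl⟩
        have hrk : rk (x :: x :: t) = rk (x :: t) := by
          rw [rk, rk]
          simp
        rw [AS_step1, hrk]
        exact ih (x :: t) (by simp at hl ⊢; omega)
      · have hdw : xs.dropWhile (fun y => y == x) = xs := by
          cases xs with
          | nil => rfl
          | cons z t =>
            simp at h
            simp [h]
        rw [AS_step2 x xs h, rk, hdw, List.nodup_cons, mem_rk]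
        have := ih xs (by simp at hl; omega)
        tauto


-- ===== A-side characterization =====

lemma foldA_fst_get (l : List String) (q : String) : ∀ (n : Int) (d1 d2 : PySem.Dict String Int),
    ((PySem.List.enumerate l n).foldl aStep (d1, d2)).1.get? q
      = (d1.get? q).or ((fIdx q l).map (fun j => n + (j : Int))) := by
  induction l with
  | nil => intro n d1 d2; simp [PySem.List.enumerate, fIdx]
  | cons x xs ih =>
    intro n d1 d2
    rw [PySem.List.enumerate_cons, List.foldl_cons]
    show ((PySem.List.enumerate xs (n+1)).foldl aStep
      (if d1.contains x then d1 else d1.insert x n, d2.insert x n)).1.get? q = _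
    rw [ih]
    by_cases hq : q = x
    · subst hq
      cases hc : d1.contains q with
      | true =>
        have : (d1.get? q).isSome := by rw [← PySem.Dict.contains_eq_isSome_get?, hc]
        cases hg : d1.get? q with
        | none => rw [hg] at this; simp at this
        | some v => simp [hg]
      | false =>
        simp only [if_neg Bool.false_ne_true]
        have hg : d1.get? q = none := by
          have := PySem.Dict.contains_eq_isSome_get? d1 q
          rw [hc] at this
          cases hgg : d1.get? q
          · rfl
          · rw [hgg] at this; simp at this
        rw [PySem.Dict.get?_insert, if_pos rfl, hg]
        simp [fIdx]
    · have hg1 : (if d1.contains x then d1 else d1.insert x n).get? q = d1.get? q := by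
        split
        · rfl
        · rw [PySem.Dict.get?_insert, if_neg hq]
      rw [hg1]
      have hxq : ¬ x = q := fun hh => hq hh.symm
      have hf : fIdx q (x :: xs) = (fIdx q xs).map (· + 1) := by
        simp [fIdx, hxq]
      rw [hf]
      cases fIdx q xs with
      | none => simp
      | some j => simp; ring_nf

lemma foldA_snd_get (l : List String) (q : String) : ∀ (n : Int) (d1 d2 : PySem.Dict String Int),
    ((PySem.List.enumerate l n).foldl aStep (d1, d2)).2.get? q
      = ((lIdx q l).map (fun j => n + (j : Int))).or (d2.get? q) := by
  induction l with
  | nil => intro n d1 d2; simp [PySem.List.enumerate, lIdx]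
  | cons x xs ih =>
    intro n d1 d2
    rw [PySem.List.enumerate_cons, List.foldl_cons]
    show ((PySem.List.enumerate xs (n+1)).foldl aStep
      (if d1.contains x then d1 else d1.insert x n, d2.insert x n)).2.get? q = _
    rw [ih]
    cases hL : lIdx q xs with
    | some j =>
      have : lIdx q (x :: xs) = some (j + 1) := by simp [lIdx, hL]
      rw [this]
      simp
      ring_nf
    | none =>
      by_cases hq : q = x
      · subst hq
        have : lIdx q (q :: xs) = some 0 := by simp [lIdx, hL]
        rw [this, PySem.Dict.get?_insert, if_pos rfl]
        simp
      · have hxq : ¬ x = q := fun hh => hq hh.symm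
        have : lIdx q (x :: xs) = none := by
          rw [lIdx_cons, hL]
          simp [hxq]
        rw [this, PySem.Dict.get?_insert, if_neg hq]
        simp

lemma foldA_keys (l : List String) : ∀ (n : Int) (d1 d2 : PySem.Dict String Int),
    ((PySem.List.enumerate l n).foldl aStep (d1, d2)).1.keys = PySem.Set.update d1.keys l := by
  induction l with
  | nil => intro n d1 d2; simp [PySem.List.enumerate, PySem.Set.update]
  | cons x xs ih =>
    intro n d1 d2
    rw [PySem.List.enumerate_cons, List.foldl_cons]
    show ((PySem.List.enumerate xs (n+1)).foldl aStep
      (if d1.contains x then d1 else d1.insert x n, d2.insert x n)).1.keys = _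
    rw [ih]
    have hkeys : (if d1.contains x then d1 else d1.insert x n).keys = PySem.Set.add d1.keys x := by
      cases hc : d1.contains x with
      | true =>
        have hm : x ∈ d1.keys := by
          rw [PySem.Dict.contains_eq_decide_mem_keys] at hc; simpa using hc
        simp [PySem.Set.add, PySem.Set.contains, hm]
      | false =>
        have hm : x ∉ d1.keys := by
          rw [PySem.Dict.contains_eq_decide_mem_keys] at hc; simpa using hc
        rw [if_neg (by simp)]
        rw [PySem.Dict.keys_insert_of_not_contains _ _ hc]
        simp [PySem.Set.add, PySem.Set.contains, hm]
    rw [hkeys]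
    rfl

lemma A_iff (l : List String) : check_contiguous_groups l = true ↔ AS l := by
  have hfst : ∀ q, ((PySem.List.enumerate l 0).foldl aStep (PySem.Dict.empty, PySem.Dict.empty)).1.get? q
      = (fIdx q l).map (fun j : Nat => (j : Int)) := by
    intro q
    rw [foldA_fst_get l q 0 PySem.Dict.empty PySem.Dict.empty, PySem.Dict.get?_empty,
        Option.none_or]
    cases fIdx q l <;> simp
  have hsnd : ∀ q, ((PySem.List.enumerate l 0).foldl aStep (PySem.Dict.empty, PySem.Dict.empty)).2.get? q
      = (lIdx q l).map (fun j : Nat => (j : Int)) := by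
    intro q
    rw [foldA_snd_get l q 0 PySem.Dict.empty PySem.Dict.empty, PySem.Dict.get?_empty,
        Option.or_none]
    cases lIdx q l <;> simp
  have hkeys : ((PySem.List.enumerate l 0).foldl aStep (PySem.Dict.empty, PySem.Dict.empty)).1.keys
      = PySem.Set.ofList l := by
    rw [foldA_keys l 0 PySem.Dict.empty PySem.Dict.empty]
    rw [PySem.Dict.keys_empty]
    rfl
  unfold check_contiguous_groups
  simp only [hkeys, hfst, hsnd, List.all_eq_true]
  constructor
  · intro h q
    by_cases hq : q ∈ l
    · have hb := h q ((PySem.Set.mem_ofList l q).mpr hq)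
      obtain ⟨a, ha⟩ := Option.isSome_iff_exists.mp ((mem_fIdx q l).mp hq)
      obtain ⟨c, hc⟩ := Option.isSome_iff_exists.mp ((mem_lIdx q l).mp hq)
      rw [ha, hc] at hb
      simp only [Option.map_some, Option.getD_some] at hb
      rw [Bool.not_eq_true', List.any_eq_false] at hb
      intro a' c' k ha' hc' hak hkc
      rw [ha] at ha'
      rw [hc] at hc'
      injection ha' with ha'
      injection hc' with hc'
      subst ha'
      subst hc'
      have hmem : ((k : Nat) : Int) ∈ PySem.List.pyRange (a : Int) ((c : Int) + 1) 1 :=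
        PySem.List.mem_pyRange_one.mpr ⟨by exact_mod_cast hak, by omega⟩
      have hbk := hb _ hmem
      rw [PySem.List.pyGet?_natCast] at hbk
      simpa using hbk
    · intro a' c' k ha' _ _ _
      exact absurd ((mem_fIdx q l).mpr (by rw [ha']; simp)) hq
  · intro h q hqm
    have hq : q ∈ l := (PySem.Set.mem_ofList l q).mp hqm
    obtain ⟨a, ha⟩ := Option.isSome_iff_exists.mp ((mem_fIdx q l).mp hq)
    obtain ⟨c, hc⟩ := Option.isSome_iff_exists.mp ((mem_lIdx q l).mp hq)
    rw [ha, hc]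
    simp only [Option.map_some, Option.getD_some]
    rw [Bool.not_eq_true', List.any_eq_false]
    intro i hi
    rw [PySem.List.mem_pyRange_one] at hi
    have h0 : 0 ≤ i := le_trans (Int.natCast_nonneg a) hi.1
    have hik : i = ((i.toNat : Nat) : Int) := (Int.toNat_of_nonneg h0).symm
    rw [hik, PySem.List.pyGet?_natCast]
    have hval := h q a c i.toNat ha hc (by omega) (by omega)
    simp [hval]

-- ===== B-side characterization =====

lemma foldB (l : List String) : ∀ (acc : List String) (a : String),
    l.foldl bStep (acc ++ [a]) = acc ++ a :: rk (l.dropWhile (fun y => y == a)) := by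
  induction l with
  | nil => intro acc a; simp [rk]
  | cons x xs ih =>
    intro acc a
    rw [List.foldl_cons]
    by_cases hax : a = x
    · subst hax
      have : bStep (acc ++ [a]) a = acc ++ [a] := by
        simp [bStep]
      rw [this, ih]
      simp
    · have : bStep (acc ++ [a]) x = (acc ++ [a]) ++ [x] := by
        simp [bStep, hax]
      rw [this, ih]
      have hdw : (x :: xs).dropWhile (fun y => y == a) = x :: xs := by
        rw [List.dropWhile_cons, if_neg (by simp; exact fun h => hax h.symm)]
      rw [hdw, rk]
      simp

lemma lenSet_iff (ks : List String) : (ks.length == (PySem.Set.ofList ks).length) = true ↔ ks.Nodup := by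
  have hperm : (PySem.Set.ofList ks).Perm ks.dedup := by
    refine (List.perm_ext_iff_of_nodup (PySem.Set.nodup_ofList ks) (List.nodup_dedup ks)).mpr ?_
    intro x
    rw [PySem.Set.mem_ofList, List.mem_dedup]
  rw [beq_iff_eq, hperm.length_eq]
  constructor
  · intro h
    rw [← List.dedup_eq_self]
    exact (List.dedup_sublist ks).eq_of_length h.symm
  · intro h
    rw [List.dedup_eq_self.mpr h]

lemma B_iff (l : List String) : check_contiguous_groups_alt l = true ↔ (rk l).Nodup := by
  have hkeys : l.foldl bStep [] = rk l := by
    cases l with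
    | nil => simp [rk]
    | cons x xs =>
      rw [List.foldl_cons]
      have : bStep [] x = [] ++ [x] := by simp [bStep]
      rw [this, foldB xs [] x, rk]
      simp
  show (((l.foldl bStep []).length == (PySem.Set.ofList (l.foldl bStep [])).length) = true) ↔ _
  rw [hkeys, lenSet_iff]

-- ===== VERDICT (by name: the statement is the Claim_ definition above) =====
theorem check_contiguous_groups_spec : Claim_equal_check_contiguous_groups := by
  intro qids _
  show check_contiguous_groups qids = check_contiguous_groups_alt qids
  rw [Bool.eq_iff_iff, A_iff, B_iff]
  exact AS_iff_nodup_rk qids.length qids le_rfl
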